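-- pv_equiv track=rewrite | github.com/WehkingDiane/ratsi_melle | src/analysis/analysis_context.py | _top_summary_bits
-- ===== SOURCE A (Python) =====
-- def _mode_field_keys(mode: str) -> tuple[str, ...]:
--     if mode == "change_monitor":
--         return ("entscheidung", "beschlusstext", "finanzbezug", "zustaendigkeit")
--     if mode == "journalistic_brief":
--         return ("entscheidung", "beschlusstext", "begruendung", "finanzbezug", "zustaendigkeit")
--     if mode == "decision_brief":
--         return ("beschlusstext", "entscheidung", "zustaendigkeit", "begruendung")
--     if mode == "financial_impact":
--         return ("finanzbezug", "begruendung", "entscheidung")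
--     if mode == "topic_classifier":
--         return ("titel", "begruendung", "finanzbezug")
--     if mode == "citizen_explainer":
--         return ("beschlusstext", "begruendung", "finanzbezug")
--     if mode == "summary":
--         return ("beschlusstext", "finanzbezug")
--     return ("beschlusstext", "entscheidung", "begruendung", "finanzbezug", "zustaendigkeit")
--
-- def _top_summary_bits(documents: list[dict], mode: str) -> list[str]:
--     fields = _mode_field_keys(mode)
--     values: list[str] = []
--     for key in fields:
--         for value in _distinct_field_values(documents, key):
--             values.append(f"{key}: {_truncate(value, 140)}")
--             if len(values) >= 3:
--                 return values
--     return values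
--
-- def _distinct_field_values(documents: list[dict], key: str, *extra_keys: str) -> list[str]:
--     values: list[str] = []
--     seen: set[str] = set()
--     for document in documents:
--         fields = document.get("structured_fields")
--         if not isinstance(fields, dict):
--             continue
--         for field_key in (key, *extra_keys):
--             value = fields.get(field_key)
--             if isinstance(value, str) and value.strip():
--                 normalized = " ".join(value.split())
--                 if normalized not in seen:
--                     seen.add(normalized)
--                     values.append(normalized)
--     return values
--
-- def _truncate(value: str, max_chars: int) -> str:
--     cleaned = " ".join(value.split())
--     if len(cleaned) <= max_chars:
--         return cleaned
--     return cleaned[: max_chars - 1].rstrip() + "..."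
-- ===== SOURCE B (Python) =====
-- def _mode_field_keys(mode: str) -> tuple[str, ...]:
--     if mode == "change_monitor":
--         return ("entscheidung", "beschlusstext", "finanzbezug", "zustaendigkeit")
--     if mode == "journalistic_brief":
--         return ("entscheidung", "beschlusstext", "begruendung", "finanzbezug", "zustaendigkeit")
--     if mode == "decision_brief":
--         return ("beschlusstext", "entscheidung", "zustaendigkeit", "begruendung")
--     if mode == "financial_impact":
--         return ("finanzbezug", "begruendung", "entscheidung")
--     if mode == "topic_classifier":
--         return ("titel", "begruendung", "finanzbezug")
--     if mode == "citizen_explainer":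
--         return ("beschlusstext", "begruendung", "finanzbezug")
--     if mode == "summary":
--         return ("beschlusstext", "finanzbezug")
--     return ("beschlusstext", "entscheidung", "begruendung", "finanzbezug", "zustaendigkeit")
--
--
-- def _truncate(value: str, max_chars: int) -> str:
--     cleaned = " ".join(value.split())
--     if len(cleaned) <= max_chars:
--         return cleaned
--     return cleaned[: max_chars - 1].rstrip() + "..."
--
--
-- def _top_summary_bits(documents: list[dict], mode: str) -> list[str]:
--     fields = _mode_field_keys(mode)
--     # One indexing pass over documents: per field key, an ordered list of
--     # unseen normalized values (independent seen set per key).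
--     index = {key: ([], set()) for key in fields}
--     for document in documents:
--         sf = document.get("structured_fields")
--         if not isinstance(sf, dict):
--             continue
--         for key in fields:
--             value = sf.get(key)
--             if isinstance(value, str) and value.strip():
--                 normalized = " ".join(value.split())
--                 ordered, seen = index[key]
--                 if normalized not in seen:
--                     seen.add(normalized)
--                     ordered.append(normalized)
--     # Assembly pass over the field tuple, stopping at 3.
--     values: list[str] = []
--     for key in fields:
--         for normalized in index[key][0]:
--             values.append(f"{key}: {_truncate(normalized, 140)}")
--             if len(values) >= 3:
--                 return values
--     return values
-- ===== Notes on version B (the rewrite author's own statement) =====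
-- stated objective: alternative
-- what changed: A rescans the whole document list once per field key of the mode (each scan rebuilding a dedup set); B makes a single indexing pass over the documents that maintains, per field key, an ordered list plus an independent seen set, and then assembles the up-to-3 truncated bits in one pass over the mode's field tuple.
import Mathlib
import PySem

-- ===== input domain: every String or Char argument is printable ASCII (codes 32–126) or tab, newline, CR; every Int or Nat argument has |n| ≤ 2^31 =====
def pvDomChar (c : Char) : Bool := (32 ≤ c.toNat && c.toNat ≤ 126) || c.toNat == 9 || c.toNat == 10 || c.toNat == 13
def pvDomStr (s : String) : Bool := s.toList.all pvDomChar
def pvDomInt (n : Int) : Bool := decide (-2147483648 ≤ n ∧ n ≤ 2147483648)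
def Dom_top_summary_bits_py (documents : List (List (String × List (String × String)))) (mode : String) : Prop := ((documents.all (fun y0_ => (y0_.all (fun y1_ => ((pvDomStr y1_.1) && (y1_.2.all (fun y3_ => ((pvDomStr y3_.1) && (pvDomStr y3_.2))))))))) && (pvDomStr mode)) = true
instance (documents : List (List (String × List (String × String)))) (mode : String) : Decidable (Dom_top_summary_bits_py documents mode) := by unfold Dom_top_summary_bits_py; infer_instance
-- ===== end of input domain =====

-- B replaces A's per-field repeated scans of the document list by ONE indexing pass over
-- documents (a per-key ordered list + seen set) followed by one assembly pass over the field
-- tuple (objective: alternative decomposition; same results, return value only).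

-- ===== PORT A =====
-- shared module-level helpers of Source A/Source B
def pvModeFieldKeys (mode : String) : List String :=
  if mode = "change_monitor" then ["entscheidung", "beschlusstext", "finanzbezug", "zustaendigkeit"]
  else if mode = "journalistic_brief" then ["entscheidung", "beschlusstext", "begruendung", "finanzbezug", "zustaendigkeit"]
  else if mode = "decision_brief" then ["beschlusstext", "entscheidung", "zustaendigkeit", "begruendung"]
  else if mode = "financial_impact" then ["finanzbezug", "begruendung", "entscheidung"]
  else if mode = "topic_classifier" then ["titel", "begruendung", "finanzbezug"]
  else if mode = "citizen_explainer" then ["beschlusstext", "begruendung", "finanzbezug"]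
  else if mode = "summary" then ["beschlusstext", "finanzbezug"]
  else ["beschlusstext", "entscheidung", "begruendung", "finanzbezug", "zustaendigkeit"]

def pvTruncate (value : String) (maxChars : Int) : String :=
  let cleaned := PySem.Str.join " " (PySem.Str.split₀ value)
  if PySem.Str.len cleaned ≤ maxChars then cleaned
  else PySem.Str.rstrip (PySem.Str.slice cleaned none (some (maxChars - 1))) ++ "..."

-- _distinct_field_values: one document step (values list, seen set)
def pvDistinctStep (key : String) (extraKeys : List String)
    (st : List String × PySem.Set String)
    (document : List (String × List (String × String))) : List String × PySem.Set String :=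
  match PySem.Dict.get? (PySem.Dict.mk document) "structured_fields" with
  | none => st
  | some fields =>
    (key :: extraKeys).foldl (fun st fieldKey =>
      match PySem.Dict.get? (PySem.Dict.mk fields) fieldKey with
      | none => st
      | some value =>
        if PySem.Str.strip value ≠ "" then
          let normalized := PySem.Str.join " " (PySem.Str.split₀ value)
          if st.2.contains normalized then st
          else (st.1 ++ [normalized], st.2.add normalized)
        else st) st

def pvDistinctFieldValues (documents : List (List (String × List (String × String))))
    (key : String) (extraKeys : List String) : List String :=
  (documents.foldl (pvDistinctStep key extraKeys) ([], PySem.Set.empty)).1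

-- the inner 'for value in …: append; if len >= 3: return' loop of A (Bool = early return)
def pvEmitValsA (key : String) : List String → List String → List String × Bool
  | [], acc => (acc, false)
  | v :: vs, acc =>
    let acc' := acc ++ [key ++ ": " ++ pvTruncate v 140]
    if 3 ≤ acc'.length then (acc', true) else pvEmitValsA key vs acc'

def pvEmitA (documents : List (List (String × List (String × String)))) :
    List String → List String → List String
  | [], acc => acc
  | key :: rest, acc =>
    let r := pvEmitValsA key (pvDistinctFieldValues documents key []) acc
    if r.2 then r.1 else pvEmitA documents rest r.1

def top_summary_bits_py (documents : List (List (String × List (String × String)))) (mode : String) : List String :=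
  pvEmitA documents (pvModeFieldKeys mode) []

-- ===== PORT B =====
-- one field-key update inside the indexing pass
def pvStepB (sf : List (String × String)) (key : String)
    (p : List String × PySem.Set String) : List String × PySem.Set String :=
  match PySem.Dict.get? (PySem.Dict.mk sf) key with
  | none => p
  | some value =>
    if PySem.Str.strip value ≠ "" then
      let normalized := PySem.Str.join " " (PySem.Str.split₀ value)
      if p.2.contains normalized then p
      else (p.1 ++ [normalized], p.2.add normalized)
    else p

-- one document of the indexing pass: update every field key's entry
def pvIndexDoc (document : List (String × List (String × String)))
    (st : List (String × (List String × PySem.Set String))) :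
    List (String × (List String × PySem.Set String)) :=
  match PySem.Dict.get? (PySem.Dict.mk document) "structured_fields" with
  | none => st
  | some sf => st.map (fun e => (e.1, pvStepB sf e.1 e.2))

def pvBuildIndex (documents : List (List (String × List (String × String))))
    (fields : List String) : List (String × (List String × PySem.Set String)) :=
  documents.foldl (fun st doc => pvIndexDoc doc st)
    (fields.map (fun k => (k, ([], PySem.Set.empty))))

-- assembly pass of B (identical inner loop, reading the index)
def pvEmitValsB (key : String) : List String → List String → List String × Bool
  | [], acc => (acc, false)
  | v :: vs, acc =>
    let acc' := acc ++ [key ++ ": " ++ pvTruncate v 140]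
    if 3 ≤ acc'.length then (acc', true) else pvEmitValsB key vs acc'

def pvEmitB (index : List (String × (List String × PySem.Set String))) :
    List String → List String → List String
  | [], acc => acc
  | key :: rest, acc =>
    let vals := ((PySem.Dict.get? (PySem.Dict.mk index) key).getD ([], PySem.Set.empty)).1
    let r := pvEmitValsB key vals acc
    if r.2 then r.1 else pvEmitB index rest r.1

def top_summary_bits_py_alt (documents : List (List (String × List (String × String)))) (mode : String) : List String :=
  let fields := pvModeFieldKeys mode
  pvEmitB (pvBuildIndex documents fields) fields []

-- ===== PRECONDITION & SPEC =====
def Spec_top_summary_bits_py (documents : List (List (String × List (String × String)))) (mode : String) (out : List String) : Prop := out = top_summary_bits_py_alt documents mode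
instance (documents : List (List (String × List (String × String)))) (mode : String) (out : List String) : Decidable (Spec_top_summary_bits_py documents mode out) := by unfold Spec_top_summary_bits_py; infer_instance

-- ===== CLAIM (what is proved, stated in full; the proofs are below) =====
def Claim_equal_top_summary_bits_py : Prop := ∀ (documents : List (List (String × List (String × String)))) (mode : String), Dom_top_summary_bits_py documents mode → Spec_top_summary_bits_py documents mode (top_summary_bits_py documents mode)

-- ===== LEMMAS AND PROOFS =====

-- per-document, per-key step seen from A's side
def pvDocStep (document : List (String × List (String × String))) (key : String)
    (p : List String × PySem.Set String) : List String × PySem.Set String :=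
  match PySem.Dict.get? (PySem.Dict.mk document) "structured_fields" with
  | none => p
  | some sf => pvStepB sf key p

theorem pvDistinctStep_eq_docStep (key : String)
    (st : List String × PySem.Set String) (document : List (String × List (String × String))) :
    pvDistinctStep key [] st document = pvDocStep document key st := by
  unfold pvDistinctStep pvDocStep pvStepB
  cases PySem.Dict.get? (PySem.Dict.mk document) "structured_fields" with
  | none => rfl
  | some fields => simp [List.foldl]

theorem pvIndexDoc_eq_map (document : List (String × List (String × String)))
    (st : List (String × (List String × PySem.Set String))) :
    pvIndexDoc document st = st.map (fun e => (e.1, pvDocStep document e.1 e.2)) := by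
  unfold pvIndexDoc pvDocStep
  cases PySem.Dict.get? (PySem.Dict.mk document) "structured_fields" with
  | none => simp
  | some sf => rfl

theorem pvFoldIndex_eq_map (documents : List (List (String × List (String × String))))
    (st : List (String × (List String × PySem.Set String))) :
    documents.foldl (fun st doc => pvIndexDoc doc st) st
      = st.map (fun e => (e.1, documents.foldl (fun p d => pvDocStep d e.1 p) e.2)) := by
  induction documents generalizing st with
  | nil => simp
  | cons d ds ih =>
    rw [List.foldl_cons, pvIndexDoc_eq_map, ih, List.map_map]
    simp [Function.comp]

theorem pvLookup_map (fields : List String) (key : String)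
    (f : String → List String × PySem.Set String) (hk : key ∈ fields) :
    PySem.Dict.get? (PySem.Dict.mk (fields.map (fun k => (k, f k)))) key = some (f key) := by
  induction fields with
  | nil => cases hk
  | cons a rest ih =>
    simp only [List.map_cons, PySem.Dict.get?_mk_cons]
    by_cases h : a = key
    · simp [h]
    · have : key ∈ rest := by
        cases hk with
        | head => exact absurd rfl h
        | tail _ h' => exact h'
      simp [h, ih this]

theorem pvBuildIndex_lookup (documents : List (List (String × List (String × String))))
    (fields : List String) (key : String) (hk : key ∈ fields) :
    PySem.Dict.get? (PySem.Dict.mk (pvBuildIndex documents fields)) key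
      = some (documents.foldl (fun p d => pvDocStep d key p) ([], PySem.Set.empty)) := by
  unfold pvBuildIndex
  rw [pvFoldIndex_eq_map, List.map_map]
  exact pvLookup_map fields key _ hk

theorem pvDistinct_eq_fold (documents : List (List (String × List (String × String)))) (key : String) :
    pvDistinctFieldValues documents key []
      = (documents.foldl (fun p d => pvDocStep d key p) ([], PySem.Set.empty)).1 := by
  unfold pvDistinctFieldValues
  have h : pvDistinctStep key [] = fun p d => pvDocStep d key p :=
    funext fun st => funext fun d => pvDistinctStep_eq_docStep key st d
  rw [h]

theorem pvEmitVals_eq (key : String) (vs acc : List String) :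
    pvEmitValsB key vs acc = pvEmitValsA key vs acc := by
  induction vs generalizing acc with
  | nil => rfl
  | cons v vs ih =>
    simp only [pvEmitValsA, pvEmitValsB]
    split <;> simp [ih]

theorem pvEmitB_eq_A (documents : List (List (String × List (String × String))))
    (index : List (String × (List String × PySem.Set String))) (fs acc : List String)
    (hlook : ∀ k ∈ fs,
      ((PySem.Dict.get? (PySem.Dict.mk index) k).getD ([], PySem.Set.empty)).1
        = pvDistinctFieldValues documents k []) :
    pvEmitB index fs acc = pvEmitA documents fs acc := by
  induction fs generalizing acc with
  | nil => rfl
  | cons key rest ih =>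
    unfold pvEmitB pvEmitA
    simp only [hlook key List.mem_cons_self, pvEmitVals_eq]
    split
    · rfl
    · exact ih _ (fun k hk => hlook k (List.mem_cons_of_mem _ hk))

-- ===== VERDICT (by name: the statement is the Claim_ definition above) =====
theorem top_summary_bits_py_spec : Claim_equal_top_summary_bits_py := by
  intro documents mode _
  unfold Spec_top_summary_bits_py top_summary_bits_py top_summary_bits_py_alt
  refine (pvEmitB_eq_A documents _ _ [] ?_).symm
  intro k hk
  rw [pvBuildIndex_lookup documents _ k hk, pvDistinct_eq_fold]
  rfl
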